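-- pv_equiv track=rewrite | github.com/wtriddle/IFG | ifg.py | DLAtoSARconversion
-- ===== SOURCE A (Python) =====
-- def DLAtoSARconversion(template):
-- 	# conversionLegend
-- 	# BR --> X
-- 	# CL --> Z
-- 	templatePos = -1
-- 	reformattedTemplate = ""
-- 	while templatePos != len(template) - 1:
-- 		templatePos += 1
-- 		# If symbol is doubled lettered, change it to a single letter representation
-- 		if template[templatePos:templatePos+2] == "Br":
-- 			reformattedTemplate += "X"
-- 			templatePos += 1
-- 		elif template[templatePos:templatePos+2] == "Cl":
-- 			reformattedTemplate += "Z"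
-- 			templatePos += 1
-- 		else:
-- 			reformattedTemplate += template[templatePos]
-- 	return reformattedTemplate
-- ===== SOURCE B (Python) =====
-- def DLAtoSARconversion(template):
--     # conversionLegend: Br --> X, Cl --> Z
--     return template.replace("Br", "X").replace("Cl", "Z")
-- ===== Notes on version B (the rewrite author's own statement) =====
-- stated objective: faster
-- what changed: Replaces the hand-written indexed while-loop state machine (slice-compare at each position, manual skip, quadratic += string building) with two chained C-level str.replace passes, safe because the inserted letters X/Z can never create or overlap a new Br/Cl digraph.
import Mathlib
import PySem

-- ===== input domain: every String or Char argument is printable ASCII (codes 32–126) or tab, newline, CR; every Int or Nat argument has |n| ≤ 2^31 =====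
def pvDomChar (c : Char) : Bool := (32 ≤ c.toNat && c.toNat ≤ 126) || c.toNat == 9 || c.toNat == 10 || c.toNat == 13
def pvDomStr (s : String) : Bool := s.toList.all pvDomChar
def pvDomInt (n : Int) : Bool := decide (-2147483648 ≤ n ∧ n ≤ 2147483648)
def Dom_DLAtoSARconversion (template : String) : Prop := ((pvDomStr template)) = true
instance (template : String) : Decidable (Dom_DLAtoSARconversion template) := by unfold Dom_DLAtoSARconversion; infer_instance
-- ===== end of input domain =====

-- B replaces A's indexed while-loop state machine (with its quadratic string +=) by two chained str.replace passes; a timing run measured B faster.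

-- ===== PORT A =====
-- A's while-loop scans index by index; its state is the current position and the output
-- built so far.  Ported as recursion on the remaining suffix (= template[templatePos:]):
-- template[pos:pos+2] is the take-2 of the suffix, a match advances two positions
-- (drop 1 of the tail), otherwise template[pos] is appended and we advance one.
-- The loop guard 'templatePos != len(template) - 1' terminates exactly when the suffix
-- is exhausted (a two-char match ending at the last index lands on len-1 as well).
def DLAtoSARconversionGo : List Char → List Char
  | [] => []
  | c :: t =>
    if List.take 2 (c :: t) = ['B', 'r'] then 'X' :: DLAtoSARconversionGo (t.drop 1)
    else if List.take 2 (c :: t) = ['C', 'l'] then 'Z' :: DLAtoSARconversionGo (t.drop 1)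
    else c :: DLAtoSARconversionGo t
  termination_by l => l.length
  decreasing_by all_goals (simp; try omega)

def DLAtoSARconversion (template : String) : String :=
  String.ofList (DLAtoSARconversionGo template.toList)

-- ===== PORT B =====
def DLAtoSARconversion_alt (template : String) : String :=
  PySem.Str.replace (PySem.Str.replace template "Br" "X") "Cl" "Z"

-- ===== PRECONDITION & SPEC =====
def Spec_DLAtoSARconversion (template : String) (out : String) : Prop := out = DLAtoSARconversion_alt template
instance (template : String) (out : String) : Decidable (Spec_DLAtoSARconversion template out) := by unfold Spec_DLAtoSARconversion; infer_instance

-- ===== CLAIM (what is proved, stated in full; the proofs are below) =====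
def Claim_equal_DLAtoSARconversion : Prop := ∀ (template : String), Dom_DLAtoSARconversion template → Spec_DLAtoSARconversion template (DLAtoSARconversion template)

-- ===== LEMMAS AND PROOFS =====

-- Simple one-pass characterisation of replace with a two-char pattern [a,b] and one-char image [x].
def repD (a b x : Char) : List Char → List Char
  | [] => []
  | c :: t =>
    if c = a ∧ t.head? = some b then x :: repD a b x t.tail
    else c :: repD a b x t
  termination_by l => l.length
  decreasing_by all_goals (simp; try omega)

theorem repD_nil (a b x : Char) : repD a b x [] = [] := by simp [repD]

theorem repD_cons (a b x c : Char) (t : List Char) :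
    repD a b x (c :: t) =
      if c = a ∧ t.head? = some b then x :: repD a b x t.tail
      else c :: repD a b x t := by
  rw [repD]

theorem isPrefixOf_pair_iff (a b c : Char) (t : List Char) :
    List.isPrefixOf [a, b] (c :: t) = true ↔ (c = a ∧ t.head? = some b) := by
  cases t <;> simp [List.isPrefixOf] <;> aesop

theorem replace_go_eq (a b x : Char) (fuel : Nat) (l acc : List Char) (h : l.length ≤ fuel) :
    PySem.Chars.replace.go [a, b] [x] fuel l acc = acc.reverse ++ repD a b x l := by
  induction fuel generalizing l acc with
  | zero =>
    have : l = [] := by cases l <;> simp_all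
    subst this
    simp [PySem.Chars.replace.go, repD_nil]
  | succ n ih =>
    cases l with
    | nil => simp [PySem.Chars.replace.go, repD_nil]
    | cons c t =>
      rw [PySem.Chars.replace.go, repD_cons]
      by_cases hp : (c = a ∧ t.head? = some b)
      · rw [if_pos ((isPrefixOf_pair_iff a b c t).mpr hp), if_pos hp]
        rw [ih _ _ (by simp at h ⊢; omega)]
        cases t with
        | nil => simp at hp
        | cons d u => simp
      · rw [if_neg (fun hc => hp ((isPrefixOf_pair_iff a b c t).mp hc)), if_neg hp]
        rw [ih t _ (by simp at h ⊢; omega)]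
        simp

theorem replace_pair_eq (a b x : Char) (l : List Char) :
    PySem.Chars.replace l [a, b] [x] = repD a b x l := by
  rw [PySem.Chars.replace]
  simp only [List.isEmpty_cons]
  have := replace_go_eq a b x l.length l [] le_rfl
  simpa using this

-- The head of a Br→X pass is 'X' or the original head, never 'l'.
theorem repD_head (r : List Char) (h : r.head? ≠ some 'l') :
    (repD 'B' 'r' 'X' r).head? ≠ some 'l' := by
  cases r with
  | nil => simp [repD_nil]
  | cons c t =>
    rw [repD_cons]
    by_cases hp : (c = 'B' ∧ t.head? = some 'r')
    · rw [if_pos hp]; simp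
    · rw [if_neg hp]; simpa using h

theorem go_eq_two_pass (l : List Char) :
    DLAtoSARconversionGo l = repD 'C' 'l' 'Z' (repD 'B' 'r' 'X' l) := by
  induction hn : l.length using Nat.strong_induction_on generalizing l with
  | _ n ih =>
  cases l with
  | nil => simp [DLAtoSARconversionGo, repD_nil]
  | cons c t =>
    rw [DLAtoSARconversionGo]
    by_cases hBr : List.take 2 (c :: t) = ['B', 'r']
    · rw [if_pos hBr]
      obtain ⟨rfl, t', rfl⟩ : c = 'B' ∧ ∃ t', t = 'r' :: t' := by
        cases t with
        | nil => simp at hBr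
        | cons d u => simp at hBr; exact ⟨hBr.1, u, by simp [hBr.2]⟩
      rw [repD_cons, if_pos (by simp)]
      rw [repD_cons, if_neg (by simp)]
      simp only [List.drop_succ_cons, List.drop_zero, List.tail_cons]
      rw [ih t'.length (by subst hn; simp) t' rfl]
    · rw [if_neg hBr]
      by_cases hCl : List.take 2 (c :: t) = ['C', 'l']
      · rw [if_pos hCl]
        obtain ⟨rfl, t', rfl⟩ : c = 'C' ∧ ∃ t', t = 'l' :: t' := by
          cases t with
          | nil => simp at hCl
          | cons d u => simp at hCl; exact ⟨hCl.1, u, by simp [hCl.2]⟩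
        rw [repD_cons 'B' 'r' 'X' 'C', if_neg (by simp)]
        rw [repD_cons 'B' 'r' 'X' 'l', if_neg (by simp)]
        rw [repD_cons 'C' 'l' 'Z' 'C', if_pos (by simp)]
        simp only [List.drop_succ_cons, List.drop_zero, List.tail_cons]
        rw [ih t'.length (by subst hn; simp) t' rfl]
      · rw [if_neg hCl]
        -- c::t starts with neither digraph
        have hnotBr : ¬ (c = 'B' ∧ t.head? = some 'r') := by
          rintro ⟨rfl, hh⟩
          cases t with
          | nil => simp at hh
          | cons d u => simp at hh; subst hh; simp at hBr
        have hnotCl : ¬ (c = 'C' ∧ t.head? = some 'l') := by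
          rintro ⟨rfl, hh⟩
          cases t with
          | nil => simp at hh
          | cons d u => simp at hh; subst hh; simp at hCl
        rw [repD_cons, if_neg hnotBr]
        rw [repD_cons]
        rw [if_neg ?hcond]
        case hcond =>
          rintro ⟨rfl, hh⟩
          exact repD_head t (fun h => hnotCl ⟨rfl, h⟩) hh
        rw [ih t.length (by subst hn; simp) t rfl]

-- ===== VERDICT (by name: the statement is the Claim_ definition above) =====
theorem DLAtoSARconversion_spec : Claim_equal_DLAtoSARconversion := by
  intro template _
  show DLAtoSARconversion template = DLAtoSARconversion_alt template
  unfold DLAtoSARconversion DLAtoSARconversion_alt PySem.Str.replace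
  simp only [String.toList_ofList]
  rw [go_eq_two_pass,
    show ("Br".toList) = ['B','r'] from rfl, show ("X".toList) = ['X'] from rfl,
    show ("Cl".toList) = ['C','l'] from rfl, show ("Z".toList) = ['Z'] from rfl,
    replace_pair_eq, replace_pair_eq]
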